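-- pv_equiv track=rewrite | github.com/alokranjan609/lab | labs/aes-scratch.py | rcon
-- ===== SOURCE A (Python) =====
-- def gf_mul(a, b):
--     """Multiply two bytes in GF(2^8) with AES irreducible polynomial x^8 + x^4 + x^3 + x + 1 (0x11B)."""
--     res = 0
--     for _ in range(8):
--         if b & 1:
--             res ^= a
--         carry = a & 0x80
--         a = (a << 1) & 0xFF
--         if carry:
--             a ^= 0x1B
--         b >>= 1
--     return res
--
-- def rcon(i):
--     """Round constant Rcon[i] (only first byte, others are 0)."""
--     x = 1
--     if i == 0:
--         return 0
--     while i > 1: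
--         x = gf_mul(x, 2)
--         i -= 1
--     return x
-- ===== SOURCE B (Python) =====
-- # Rcon first bytes are powers of 2 in GF(2^8) mod 0x11B; they cycle with period 51.
-- _RCON = []
-- _x = 1
-- for _ in range(51):
--     _RCON.append(_x)
--     _x = (_x << 1) ^ (0x11B if _x & 0x80 else 0)
--
-- def rcon(i):
--     if i == 0:
--         return 0
--     return _RCON[(i - 1) % 51]
-- ===== Notes on version B (the rewrite author's own statement) =====
-- stated objective: faster
-- what changed: B replaces A's i-1 GF(2^8) doublings (each an 8-step gf_mul loop) by a once-built 51-entry cyclic Rcon table indexed with (i-1) % 51; Pre_ excludes negative i, a meaningless round index on which neither value is specified (A returns leftover loop state, B a wrapped table entry).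
-- outside the precondition, e.g. on rcon(-3): A returns 1, B returns 116
import Mathlib
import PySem

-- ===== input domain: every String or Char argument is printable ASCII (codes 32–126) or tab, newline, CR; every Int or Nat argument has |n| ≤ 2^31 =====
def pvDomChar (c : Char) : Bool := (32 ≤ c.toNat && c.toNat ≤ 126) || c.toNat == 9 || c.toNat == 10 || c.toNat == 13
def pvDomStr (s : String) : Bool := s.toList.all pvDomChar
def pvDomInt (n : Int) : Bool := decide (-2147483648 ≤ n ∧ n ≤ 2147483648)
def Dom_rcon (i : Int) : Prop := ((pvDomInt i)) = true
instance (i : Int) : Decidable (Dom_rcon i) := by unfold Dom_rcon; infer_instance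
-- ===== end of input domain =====

-- B replaces A's i-1 GF(2^8) doublings by a once-built 51-entry cyclic Rcon table indexed by (i-1) % 51 (objective: faster).

-- ===== PORT A =====
def gfMul (a b : Int) : Int :=
  ((List.range 8).foldl (fun (s : Int × Int × Int) _ =>
    let res := if PySem.Int.band s.2.2 1 ≠ 0 then PySem.Int.bxor s.1 s.2.1 else s.1
    let carry := PySem.Int.band s.2.1 0x80
    let a := PySem.Int.band (s.2.1 <<< (1 : Nat)) 0xFF
    let a := if carry ≠ 0 then PySem.Int.bxor a 0x1B else a
    (res, a, s.2.2 >>> (1 : Nat))) (0, a, b)).1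

def rconLoop (x : Int) (i : Int) : Int :=
  if h : 1 < i then rconLoop (gfMul x 2) (i - 1) else x
termination_by i.toNat
decreasing_by omega

def rcon (i : Int) : Int :=
  if i = 0 then 0 else rconLoop 1 i

-- ===== PORT B =====
def rconTable : List Int :=
  ((List.range 51).foldl (fun (s : List Int × Int) _ =>
    (s.1 ++ [s.2], PySem.Int.bxor (s.2 <<< (1 : Nat)) (if PySem.Int.band s.2 0x80 ≠ 0 then 0x11B else 0)))
    ([], 1)).1

def rcon_alt (i : Int) : Int :=
  if i = 0 then 0
  -- list indexing with default 0 is exact: the index (i-1) % 51 always lies in range 0..50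
  else PySem.List.pyGetD rconTable (PySem.Int.mod (i - 1) 51) 0

-- ===== PRECONDITION & SPEC =====
-- Pre_ excludes negative i, a meaningless round index on which neither value is specified:
-- A returns leftover loop state (1) there and B a wrapped table entry.
def Pre_rcon (i : Int) : Prop := 0 ≤ i
instance (i : Int) : Decidable (Pre_rcon i) := by unfold Pre_rcon; infer_instance
def pvWitness_rcon : Int := 7

def Spec_rcon (i : Int) (out : Int) : Prop := out = rcon_alt i
instance (i : Int) (out : Int) : Decidable (Spec_rcon i out) := by unfold Spec_rcon; infer_instance

-- ===== CLAIM (what is proved, stated in full; the proofs are below) =====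
def Claim_equal_rcon : Prop := ∀ (i : Int), Dom_rcon i → Pre_rcon i → Spec_rcon i (rcon i)

-- ===== LEMMAS AND PROOFS =====

theorem rconLoop_eq_iterate (n : Nat) : ∀ x : Int,
    rconLoop x ((n : Int) + 1) = (fun y => gfMul y 2)^[n] x := by
  induction n with
  | zero => intro x; rw [rconLoop]; simp
  | succ k ih =>
    intro x
    rw [rconLoop]
    have h1 : (1 : Int) < (↑(k + 1) : Int) + 1 := by push_cast; omega
    rw [dif_pos h1]
    have h2 : ((↑(k + 1) : Int) + 1) - 1 = (↑k : Int) + 1 := by push_cast; ring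
    rw [h2, ih (gfMul x 2), Function.iterate_succ_apply]

set_option maxRecDepth 8192 in
theorem iterate51 : (fun y => gfMul y 2)^[51] (1 : Int) = 1 := by decide

theorem iterate_mod (n : Nat) :
    (fun y => gfMul y 2)^[n] (1 : Int) = (fun y => gfMul y 2)^[n % 51] 1 := by
  induction n using Nat.strong_induction_on with
  | _ n ih =>
    by_cases h : n < 51
    · rw [Nat.mod_eq_of_lt h]
    · have h51 : 51 ≤ n := by omega
      have : n = (n - 51) + 51 := by omega
      conv_lhs => rw [this]
      rw [Function.iterate_add_apply, iterate51, ih (n - 51) (by omega)]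
      congr 1
      omega

theorem table_entry : ∀ k < 51,
    PySem.List.pyGetD rconTable ((k : Nat) : Int) 0 = (fun y => gfMul y 2)^[k] 1 := by
  decide

-- ===== VERDICT (by name: the statement is the Claim_ definition above) =====
theorem rcon_spec : Claim_equal_rcon := by
  intro i _ hpre
  unfold Spec_rcon rcon rcon_alt
  by_cases h0 : i = 0
  · simp [h0]
  · rw [if_neg h0, if_neg h0]
    obtain ⟨n, hn⟩ : ∃ n : Nat, i = (n : Int) + 1 :=
      ⟨(i - 1).toNat, by unfold Pre_rcon at hpre; omega⟩
    subst hn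
    rw [rconLoop_eq_iterate, iterate_mod]
    have hm : PySem.Int.mod ((↑n : Int) + 1 - 1) 51 = ((n % 51 : Nat) : Int) := by
      have h : ((n : Int) + 1 - 1) = ((n : Nat) : Int) := by ring
      rw [h]
      exact_mod_cast PySem.Int.mod_natCast n 51
    rw [hm, table_entry (n % 51) (Nat.mod_lt _ (by omega))]
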